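-- pv_equiv track=rewrite | github.com/Tbach1203/Project-1 | tien_xu_ly.py | replace_commas_in_quotes
-- ===== SOURCE A (Python) =====
-- def replace_commas_in_quotes(line):
--     output = []
--     in_quotes = False
--     for char in line:
--         if char == '"':
--             in_quotes = not in_quotes  # Chuyển trạng thái khi gặp dấu ngoặc
--         elif char == ',' and in_quotes:
--             output.append('|')  # Thay dấu ',' bằng '|' nếu đang trong ngoặc
--         else:
--             output.append(char)
--     return ''.join(output)
-- ===== SOURCE B (Python) =====
-- def replace_commas_in_quotes(line):
--     # Split on quotes: even-index parts are outside quotes, odd-index parts inside.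
--     parts = line.split('"')
--     out = []
--     for i, p in enumerate(parts):
--         out.append(p if i % 2 == 0 else ''.join('|' if c == ',' else c for c in p))
--     return ''.join(out)
-- ===== Notes on version B (the rewrite author's own statement) =====
-- stated objective: idiomatic
-- what changed: Replaced the per-character in_quotes state machine with splitting the line at quote characters, mapping the comma substitution over only the odd-indexed (inside-quotes) parts, and concatenating the parts back together (bulk str.split/join/replace instead of a Python-level per-character loop)
import Mathlib
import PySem

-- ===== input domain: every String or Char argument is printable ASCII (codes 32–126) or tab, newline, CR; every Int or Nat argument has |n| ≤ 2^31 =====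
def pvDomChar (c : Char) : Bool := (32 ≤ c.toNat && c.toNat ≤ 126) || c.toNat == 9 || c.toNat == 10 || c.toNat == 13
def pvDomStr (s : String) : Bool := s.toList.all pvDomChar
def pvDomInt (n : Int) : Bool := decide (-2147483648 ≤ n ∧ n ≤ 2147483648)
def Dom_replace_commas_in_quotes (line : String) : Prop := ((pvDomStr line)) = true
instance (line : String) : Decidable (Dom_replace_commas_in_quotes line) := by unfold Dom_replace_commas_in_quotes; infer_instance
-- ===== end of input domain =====

-- B replaces A's per-character in_quotes state machine by splitting the line at quote
-- characters, transforming only the odd-indexed (inside-quotes) parts, and concatenating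
-- the parts back (objective: more idiomatic decomposition).

-- ===== PORT A =====
-- literal port of A: one pass, state (output, in_quotes), append per character
def replace_commas_in_quotes (line : String) : String :=
  let st := line.toList.foldl
    (fun (st : List Char × Bool) c =>
      if c == '"' then (st.1, !st.2)
      else if c == ',' && st.2 then (st.1 ++ ['|'], st.2)
      else (st.1 ++ [c], st.2))
    ([], false)
  String.mk st.1

-- ===== PORT B =====
-- port of Source B: split at the quote character (single-char sep = List.splitOn), enumerate, transform odd parts, concatenate
def replace_commas_in_quotes_alt (line : String) : String :=
  let parts := line.toList.splitOn '"'
  String.mk (((PySem.List.enumerate parts 0).map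
    (fun ip => if ip.1 % 2 == 0 then ip.2
               else ip.2.map (fun c => if c == ',' then '|' else c))).flatten)

-- ===== PRECONDITION & SPEC =====
def Spec_replace_commas_in_quotes (line : String) (out : String) : Prop := out = replace_commas_in_quotes_alt line
instance (line : String) (out : String) : Decidable (Spec_replace_commas_in_quotes line out) := by unfold Spec_replace_commas_in_quotes; infer_instance

-- ===== CLAIM (what is proved, stated in full; the proofs are below) =====
def Claim_equal_replace_commas_in_quotes : Prop := ∀ (line : String), Dom_replace_commas_in_quotes line → Spec_replace_commas_in_quotes line (replace_commas_in_quotes line)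

-- ===== LEMMAS AND PROOFS =====

-- A's state machine as a structural recursion (output prefix factored out)
def pvProcA : List Char → Bool → List Char
  | [], _ => []
  | c :: cs, q =>
    if c == '"' then pvProcA cs (!q)
    else if c == ',' && q then '|' :: pvProcA cs q
    else c :: pvProcA cs q

def pvSubst (c : Char) : Char := if c == ',' then '|' else c

-- B's alternating concatenation, parity carried as a Bool
def pvAltProc (q : Bool) : List (List Char) → List Char
  | [] => []
  | p :: ps => (if q then p.map pvSubst else p) ++ pvAltProc (!q) ps

theorem pvFoldlA (cs : List Char) (out : List Char) (q : Bool) :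
    (cs.foldl
      (fun (st : List Char × Bool) c =>
        if c == '"' then (st.1, !st.2)
        else if c == ',' && st.2 then (st.1 ++ ['|'], st.2)
        else (st.1 ++ [c], st.2))
      (out, q)).1 = out ++ pvProcA cs q := by
  induction cs generalizing out q with
  | nil => simp [pvProcA]
  | cons c cs ih =>
    rw [List.foldl_cons]
    by_cases h1 : (c == '"') = true
    · simp only [h1, if_true, ih, pvProcA]
    · by_cases h2 : (c == ',' && q) = true
      · simp only [h1, h2, if_true, if_false, Bool.false_eq_true, ih, pvProcA,
          List.append_assoc, List.singleton_append]
      · simp only [h1, h2, Bool.false_eq_true, ite_false, ih, pvProcA,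
          List.append_assoc, List.singleton_append]

theorem pvEnumFlatten (parts : List (List Char)) (n : Int) :
    (((PySem.List.enumerate parts n).map
      (fun ip => if ip.1 % 2 == 0 then ip.2
                 else ip.2.map (fun c => if c == ',' then '|' else c))).flatten)
      = pvAltProc (n % 2 != 0) parts := by
  induction parts generalizing n with
  | nil => simp [pvAltProc, PySem.List.enumerate_nil]
  | cons p ps ih =>
    rw [PySem.List.enumerate_cons, List.map_cons, List.flatten_cons, ih]
    have hmod : (n % 2 = 0 ∧ (n + 1) % 2 = 1) ∨ (n % 2 = 1 ∧ (n + 1) % 2 = 0) := by omega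
    rcases hmod with ⟨h0, h1⟩ | ⟨h0, h1⟩
    · have e1 : (n % 2 == 0) = true := by rw [h0]; rfl
      have e2 : (n % 2 != 0) = false := by rw [h0]; rfl
      have e3 : ((n + 1) % 2 != 0) = true := by rw [h1]; rfl
      simp [e1, e2, e3, pvAltProc, pvSubst]
    · have e1 : (n % 2 == 0) = false := by rw [h0]; rfl
      have e2 : (n % 2 != 0) = true := by rw [h0]; rfl
      have e3 : ((n + 1) % 2 != 0) = false := by rw [h1]; rfl
      simp [e1, e2, e3, pvAltProc, pvSubst]

theorem pvMain (cs : List Char) (q : Bool) :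
    pvProcA cs q = pvAltProc q (cs.splitOn '"') := by
  induction cs generalizing q with
  | nil => simp [List.splitOn, List.splitOnP_nil, pvProcA, pvAltProc]
  | cons c cs ih =>
    by_cases h1 : (c == '"') = true
    · have hc : c = '"' := eq_of_beq h1
      simp only [List.splitOn] at ih ⊢
      rw [List.splitOnP_cons]
      simp [hc, pvProcA, pvAltProc, ih]
    · have hne : (List.splitOnP (fun b => b == '"') cs) ≠ [] := List.splitOnP_ne_nil _ _
      obtain ⟨p, ps, hps⟩ := List.exists_cons_of_ne_nil hne
      simp only [List.splitOn] at ih ⊢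
      rw [List.splitOnP_cons]
      simp only [h1, Bool.false_eq_true, if_false, hps, List.modifyHead]
      by_cases h2 : (c == ',' && q) = true
      · have hq : q = true := by cases q <;> simp_all
        have hc : c = ',' := by cases hcc : (c == ',') <;> simp_all
        simp [pvProcA, h1, pvAltProc, hq, ih, hps, pvSubst, hc]
      · cases q with
        | false => simp [pvProcA, h1, pvAltProc, ih, hps]
        | true =>
          have hc : ¬ (c == ',') = true := by intro hcc; simp [hcc] at h2
          simp [pvProcA, h1, h2, pvAltProc, ih, hps, pvSubst, hc]

-- ===== VERDICT (by name: the statement is the Claim_ definition above) =====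
theorem replace_commas_in_quotes_spec : Claim_equal_replace_commas_in_quotes := by
  intro line _
  unfold Spec_replace_commas_in_quotes replace_commas_in_quotes replace_commas_in_quotes_alt
  have e : ((0 : Int) % 2 != 0) = false := by decide
  simp only [pvFoldlA, List.nil_append, pvEnumFlatten, e, pvMain]
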